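-- pv_equiv track=rewrite | github.com/geometor/seer | demos/test_1.py | transform
-- ===== SOURCE A (Python) =====
-- import copy
--
-- def transform(grid):
--     """
--     Transformation Rule:
--
--     1. Traverse the grid and examine every contiguous 2x2 sub-grid.
--     2. For each sub-grid, if exactly three cells have the same non-white color (i.e., a color in 1-9)
--        and the remaining cell is white (0), then fill that white cell with blue (color 1).
--     3. Leave all other cells unchanged.
--
--     This process effectively completes an almost-complete 2x2 square (an L-shape) by inserting a blue cell.
--
--     Parameters:
--         grid (list of list of int): The input grid, where each integer represents a color.
--
--     Returns:
--         list of list of int: The output grid after applying the transformation.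
--     """
--     # Get grid dimensions
--     if not grid or not grid[0]:
--         return grid  # Return as is if grid is empty
--
--     rows = len(grid)
--     cols = len(grid[0])
--
--     # Create a deep copy of the grid to avoid modifying the input directly.
--     new_grid = copy.deepcopy(grid)
--
--     # Helper function: check a 2x2 block starting at (r, c)
--     def process_block(r, c):
--         # Coordinates of the 2x2 block cells
--         coords = [(r, c), (r, c + 1), (r + 1, c), (r + 1, c + 1)]
--         # Get the values in the block
--         values = [grid[i][j] for i, j in coords]
--
--         # Count how many are white (0) and group non-white values.
--         white_indices = [idx for idx, val in enumerate(values) if val == 0]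
--         nonwhite_values = [val for val in values if val != 0]
--
--         # Only consider block if exactly one cell is white and three cells are non-white.
--         if len(white_indices) == 1 and len(nonwhite_values) == 3:
--             # Check if all three non-white values are identical.
--             if nonwhite_values.count(nonwhite_values[0]) == 3:
--                 # Complete the 2x2 square: set the white cell to blue (color 1)
--                 missing_idx = white_indices[0]
--                 missing_cell = coords[missing_idx]
--                 new_grid[missing_cell[0]][missing_cell[1]] = 1  # blue
--
--     # Iterate over every possible 2x2 sub-grid in the grid
--     for r in range(rows - 1):
--         for c in range(cols - 1):
--             process_block(r, c)
--
--     return new_grid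
-- ===== SOURCE B (Python) =====
-- def transform(grid):
--     """Rebuild the grid cell by cell: non-white cells are copied verbatim; a white
--     cell becomes blue (1) when one of the up-to-four 2x2 blocks containing it has
--     its other three cells equal and non-white. Reads only the original grid."""
--     rows = len(grid)
--     cols = len(grid[0]) if grid else 0
--
--     def completes(r, c):
--         # does some 2x2 block with top-left (i, j) make (r, c) its missing corner?
--         for i in (r - 1, r):
--             for j in (c - 1, c):
--                 if 0 <= i <= rows - 2 and 0 <= j <= cols - 2:
--                     others = [grid[a][b]
--                               for a in (i, i + 1) for b in (j, j + 1)
--                               if (a, b) != (r, c)]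
--                     if others[0] != 0 and others.count(others[0]) == 3:
--                         return True
--         return False
--
--     return [[v if v != 0 else (1 if completes(r, c) else 0)
--              for c, v in enumerate(row)]
--             for r, row in enumerate(grid)]
-- ===== Notes on version B (the rewrite author's own statement) =====
-- stated objective: alternative
-- what changed: Instead of mutating a deep copy while scanning every 2x2 block, B rebuilds the grid functionally cell by cell: each white cell checks its up-to-four enclosing 2x2 blocks for three equal non-white neighbours; non-white cells are copied verbatim.
import Mathlib
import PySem

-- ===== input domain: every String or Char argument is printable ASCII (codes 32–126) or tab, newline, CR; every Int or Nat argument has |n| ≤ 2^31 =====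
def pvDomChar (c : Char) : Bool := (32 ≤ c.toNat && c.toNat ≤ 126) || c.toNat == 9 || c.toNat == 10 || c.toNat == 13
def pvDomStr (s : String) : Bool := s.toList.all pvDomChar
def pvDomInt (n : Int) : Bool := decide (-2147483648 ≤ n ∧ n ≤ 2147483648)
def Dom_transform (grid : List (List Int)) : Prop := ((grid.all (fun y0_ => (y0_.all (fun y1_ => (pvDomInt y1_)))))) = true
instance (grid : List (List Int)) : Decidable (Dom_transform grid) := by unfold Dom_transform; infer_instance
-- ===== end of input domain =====

-- B rebuilds the grid cell by cell instead of mutating a copy block by block (objective: alternative decomposition, same cost).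

-- grid[i][j], total form: in range on every read both ports make under Pre_transform
def pvRead (grid : List (List Int)) (i j : Int) : Int :=
  PySem.List.pyGetD (PySem.List.pyGetD grid i ([] : List Int)) j 0

-- ===== PORT A =====
-- helper process_block(r, c): mutates new_grid (threaded as `ng`)
def processBlock (grid ng : List (List Int)) (r c : Int) : List (List Int) :=
  let coords : List (Int × Int) := [(r, c), (r, c + 1), (r + 1, c), (r + 1, c + 1)]
  let values : List Int := coords.map (fun p => pvRead grid p.1 p.2)
  let whiteIndices : List Int :=
    ((PySem.List.enumerate values).filter (fun p => p.2 == 0)).map (fun p => p.1)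
  let nonwhiteValues : List Int := values.filter (fun v => !(v == 0))
  if whiteIndices.length = 1 ∧ nonwhiteValues.length = 3 then
    if nonwhiteValues.count (nonwhiteValues.headD 0) = 3 then
      let missing : Int × Int := PySem.List.pyGetD coords (whiteIndices.headD 0) (0, 0)
      -- new_grid[i][j] = 1
      PySem.List.pySetD ng missing.1
        (PySem.List.pySetD (PySem.List.pyGetD ng missing.1 []) missing.2 1)
    else ng
  else ng

def transform (grid : List (List Int)) : List (List Int) :=
  if grid = [] ∨ grid.headD [] = [] then grid
  else
    let rows : Int := PySem.List.len grid
    let cols : Int := PySem.List.len (grid.headD [])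
    -- new_grid starts as a deep copy of grid; lists are immutable here, so the copy is grid itself
    (PySem.List.pyRange 0 (rows - 1) 1).foldl
      (fun ng r =>
        (PySem.List.pyRange 0 (cols - 1) 1).foldl (fun ng c => processBlock grid ng r c) ng)
      grid

-- ===== PORT B =====
-- helper completes(r, c): does some 2x2 block make (r, c) its missing corner?
def completes (grid : List (List Int)) (rows cols : Int) (r c : Int) : Bool :=
  [r - 1, r].any (fun i => [c - 1, c].any (fun j =>
    if 0 ≤ i ∧ i ≤ rows - 2 ∧ 0 ≤ j ∧ j ≤ cols - 2 then
      let others : List Int :=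
        ([(i, j), (i, j + 1), (i + 1, j), (i + 1, j + 1)].filter
          (fun p => p ≠ (r, c))).map (fun p => pvRead grid p.1 p.2)
      !(others.headD 0 == 0) && others.count (others.headD 0) == 3
    else false))

def transform_alt (grid : List (List Int)) : List (List Int) :=
  let rows : Int := PySem.List.len grid
  let cols : Int := if grid = [] then 0 else PySem.List.len (grid.headD [])
  (PySem.List.enumerate grid).map (fun rrow =>
    (PySem.List.enumerate rrow.2).map (fun cv =>
      if cv.2 ≠ 0 then cv.2 else if completes grid rows cols rrow.1 cv.1 then 1 else 0))

-- ===== PRECONDITION & SPEC =====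
-- Pre_ excludes exactly the grids on which A raises IndexError: when there are at least
-- two rows and the first row has at least two cells, A reads every row at every column
-- below len(grid[0]), so a shorter row makes grid[i][j] raise.
def Pre_transform (grid : List (List Int)) : Prop :=
  grid.length ≤ 1 ∨ (grid.headD []).length ≤ 1 ∨
    ∀ row ∈ grid, (grid.headD []).length ≤ row.length

instance (grid : List (List Int)) : Decidable (Pre_transform grid) := by
  unfold Pre_transform; infer_instance

def pvWitness_transform : List (List Int) := [[2, 2], [2, 0]]

def Spec_transform (grid : List (List Int)) (out : List (List Int)) : Prop := out = transform_alt grid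
instance (grid : List (List Int)) (out : List (List Int)) : Decidable (Spec_transform grid out) := by unfold Spec_transform; infer_instance

-- ===== CLAIM (what is proved, stated in full; the proofs are below) =====
def Claim_equal_transform : Prop := ∀ (grid : List (List Int)), Dom_transform grid → Pre_transform grid → Spec_transform grid (transform grid)

-- ===== LEMMAS AND PROOFS =====

def pvWrite (ng : List (List Int)) (a b : Int) : List (List Int) :=
  PySem.List.pySetD ng a (PySem.List.pySetD (PySem.List.pyGetD ng a []) b 1)
def pbTarget (v0 v1 v2 v3 : Int) : Option Nat :=
  if v0 = 0 ∧ ¬v1 = 0 ∧ v1 = v2 ∧ v2 = v3 then some 0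
  else if v1 = 0 ∧ ¬v0 = 0 ∧ v0 = v2 ∧ v2 = v3 then some 1
  else if v2 = 0 ∧ ¬v0 = 0 ∧ v0 = v1 ∧ v1 = v3 then some 2
  else if v3 = 0 ∧ ¬v0 = 0 ∧ v0 = v1 ∧ v1 = v2 then some 3
  else none

theorem cg0 (r c : Int) : PySem.List.pyGetD [(r,c),(r,c+1),(r+1,c),(r+1,c+1)] (0:Int) ((0:Int),(0:Int)) = (r, c) := by simp [pysem]
theorem cg1 (r c : Int) : PySem.List.pyGetD [(r,c),(r,c+1),(r+1,c),(r+1,c+1)] (1:Int) ((0:Int),(0:Int)) = (r, c+1) := by simp [pysem]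
theorem cg2 (r c : Int) : PySem.List.pyGetD [(r,c),(r,c+1),(r+1,c),(r+1,c+1)] (2:Int) ((0:Int),(0:Int)) = (r+1, c) := by simp [pysem]
theorem cg3 (r c : Int) : PySem.List.pyGetD [(r,c),(r,c+1),(r+1,c),(r+1,c+1)] (3:Int) ((0:Int),(0:Int)) = (r+1, c+1) := by simp [pysem]

set_option maxRecDepth 8192 in
set_option maxHeartbeats 1000000 in
theorem pbAux (grid ng : List (List Int)) (r c : Int) :
    processBlock grid ng r c =
      match pbTarget (pvRead grid r c) (pvRead grid r (c + 1))
          (pvRead grid (r + 1) c) (pvRead grid (r + 1) (c + 1)) with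
      | some 0 => pvWrite ng r c
      | some 1 => pvWrite ng r (c + 1)
      | some 2 => pvWrite ng (r + 1) c
      | some 3 => pvWrite ng (r + 1) (c + 1)
      | _ => ng := by
  simp only [processBlock, pvWrite, List.map_cons, List.map_nil]
  generalize pvRead grid r c = v0
  generalize pvRead grid r (c + 1) = v1
  generalize pvRead grid (r + 1) c = v2
  generalize pvRead grid (r + 1) (c + 1) = v3
  by_cases h0 : v0 = 0 <;> by_cases h1 : v1 = 0 <;> by_cases h2 : v2 = 0 <;>
    by_cases h3 : v3 = 0 <;>
    simp_all [pbTarget, PySem.List.enumerate_cons, PySem.List.enumerate_nil,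
      List.filter_cons, List.count_cons, cg0, cg1, cg2, cg3] <;>
    split_ifs <;> first | rfl | omega

def shapeEq (X Y : List (List Int)) : Prop :=
  X.length = Y.length ∧ ∀ k : Nat, (X.getD k []).length = (Y.getD k []).length

theorem shapeEq_trans {X Y Z : List (List Int)} (h1 : shapeEq X Y) (h2 : shapeEq Y Z) :
    shapeEq X Z := ⟨h1.1.trans h2.1, fun k => (h1.2 k).trans (h2.2 k)⟩

-- "block with top-left (r,c) makes (i,j) its missing corner"
def fillsB (grid : List (List Int)) (r c i j : Int) : Bool :=
  ((i == r || i == r + 1) && ((j == c || j == c + 1) && ((pvRead grid i j == 0) &&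
  (let others : List Int :=
     ([(r, c), (r, c + 1), (r + 1, c), (r + 1, c + 1)].filter
       (fun p => p ≠ (i, j))).map (fun p => pvRead grid p.1 p.2)
   !(others.headD 0 == 0) && others.count (others.headD 0) == 3))))

theorem fillsB_true_iff (grid : List (List Int)) (r c i j : Int) :
    fillsB grid r c i j = true ↔
      ((i = r ∨ i = r + 1) ∧ (j = c ∨ j = c + 1) ∧ pvRead grid i j = 0 ∧
      (let others : List Int :=
         ([(r, c), (r, c + 1), (r + 1, c), (r + 1, c + 1)].filter
           (fun p => p ≠ (i, j))).map (fun p => pvRead grid p.1 p.2)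
       ¬others.headD 0 = 0 ∧ others.count (others.headD 0) = 3)) := by
  unfold fillsB
  simp only [Bool.and_eq_true, Bool.or_eq_true, beq_iff_eq, Bool.not_eq_eq_eq_not,
    Bool.not_true, beq_eq_false_iff_ne, ne_eq]

theorem filter_ne_00 (r c : Int) :
    ([(r, c), (r, c + 1), (r + 1, c), (r + 1, c + 1)].filter (fun p => p ≠ (r, c)))
      = [(r, c + 1), (r + 1, c), (r + 1, c + 1)] := by
  have e1 : ¬(c + 1 = c) := by omega
  have e2 : ¬(r + 1 = r) := by omega
  simp [List.filter_cons, Prod.ext_iff, e1, e2]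

theorem filter_ne_01 (r c : Int) :
    ([(r, c), (r, c + 1), (r + 1, c), (r + 1, c + 1)].filter (fun p => p ≠ (r, c + 1)))
      = [(r, c), (r + 1, c), (r + 1, c + 1)] := by
  have e1 : ¬(c = c + 1) := by omega
  have e2 : ¬(r + 1 = r) := by omega
  simp [List.filter_cons, Prod.ext_iff, e1, e2]

theorem filter_ne_10 (r c : Int) :
    ([(r, c), (r, c + 1), (r + 1, c), (r + 1, c + 1)].filter (fun p => p ≠ (r + 1, c)))
      = [(r, c), (r, c + 1), (r + 1, c + 1)] := by
  have e1 : ¬(c + 1 = c) := by omega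
  have e2 : ¬(r = r + 1) := by omega
  simp [List.filter_cons, Prod.ext_iff, e1, e2]

theorem filter_ne_11 (r c : Int) :
    ([(r, c), (r, c + 1), (r + 1, c), (r + 1, c + 1)].filter (fun p => p ≠ (r + 1, c + 1)))
      = [(r, c), (r, c + 1), (r + 1, c)] := by
  have e1 : ¬(c = c + 1) := by omega
  have e2 : ¬(r = r + 1) := by omega
  simp [List.filter_cons, Prod.ext_iff, e1, e2]

theorem count3_iff (a b c : Int) :
    (¬([a, b, c].headD 0) = 0 ∧ [a, b, c].count ([a, b, c].headD 0) = 3) ↔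
      (¬a = 0 ∧ a = b ∧ b = c) := by
  simp [List.count_cons]
  intro h
  split_ifs <;> omega

theorem fillsB_iff (grid : List (List Int)) (r c i j : Int) :
    fillsB grid r c i j ↔
      ((i = r ∧ j = c) ∧ pvRead grid r c = 0 ∧ ¬pvRead grid r (c + 1) = 0 ∧
        pvRead grid r (c + 1) = pvRead grid (r + 1) c ∧
        pvRead grid (r + 1) c = pvRead grid (r + 1) (c + 1)) ∨
      ((i = r ∧ j = c + 1) ∧ pvRead grid r (c + 1) = 0 ∧ ¬pvRead grid r c = 0 ∧
        pvRead grid r c = pvRead grid (r + 1) c ∧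
        pvRead grid (r + 1) c = pvRead grid (r + 1) (c + 1)) ∨
      ((i = r + 1 ∧ j = c) ∧ pvRead grid (r + 1) c = 0 ∧ ¬pvRead grid r c = 0 ∧
        pvRead grid r c = pvRead grid r (c + 1) ∧
        pvRead grid r (c + 1) = pvRead grid (r + 1) (c + 1)) ∨
      ((i = r + 1 ∧ j = c + 1) ∧ pvRead grid (r + 1) (c + 1) = 0 ∧ ¬pvRead grid r c = 0 ∧
        pvRead grid r c = pvRead grid r (c + 1) ∧
        pvRead grid r (c + 1) = pvRead grid (r + 1) c) := by
  rw [fillsB_true_iff]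
  constructor
  · rintro ⟨hi, hj, hz, hoth⟩
    rcases hi with rfl | rfl <;> rcases hj with rfl | rfl
    · rw [filter_ne_00] at hoth
      simp only [List.map_cons, List.map_nil] at hoth
      rw [count3_iff] at hoth
      exact Or.inl ⟨⟨rfl, rfl⟩, hz, hoth⟩
    · rw [filter_ne_01] at hoth
      simp only [List.map_cons, List.map_nil] at hoth
      rw [count3_iff] at hoth
      exact Or.inr (Or.inl ⟨⟨rfl, rfl⟩, hz, hoth⟩)
    · rw [filter_ne_10] at hoth
      simp only [List.map_cons, List.map_nil] at hoth
      rw [count3_iff] at hoth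
      exact Or.inr (Or.inr (Or.inl ⟨⟨rfl, rfl⟩, hz, hoth⟩))
    · rw [filter_ne_11] at hoth
      simp only [List.map_cons, List.map_nil] at hoth
      rw [count3_iff] at hoth
      exact Or.inr (Or.inr (Or.inr ⟨⟨rfl, rfl⟩, hz, hoth⟩))
  · rintro (⟨⟨rfl, rfl⟩, hz, hoth⟩ | ⟨⟨rfl, rfl⟩, hz, hoth⟩ | ⟨⟨rfl, rfl⟩, hz, hoth⟩ |
      ⟨⟨rfl, rfl⟩, hz, hoth⟩)
    · refine ⟨Or.inl rfl, Or.inl rfl, hz, ?_⟩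
      rw [filter_ne_00]
      simp only [List.map_cons, List.map_nil]
      rw [count3_iff]; exact hoth
    · refine ⟨Or.inl rfl, Or.inr rfl, hz, ?_⟩
      rw [filter_ne_01]
      simp only [List.map_cons, List.map_nil]
      rw [count3_iff]; exact hoth
    · refine ⟨Or.inr rfl, Or.inl rfl, hz, ?_⟩
      rw [filter_ne_10]
      simp only [List.map_cons, List.map_nil]
      rw [count3_iff]; exact hoth
    · refine ⟨Or.inr rfl, Or.inr rfl, hz, ?_⟩
      rw [filter_ne_11]
      simp only [List.map_cons, List.map_nil]
      rw [count3_iff]; exact hoth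

theorem pvRead_nonneg (X : List (List Int)) (i j : Int) (hi : 0 ≤ i) (hj : 0 ≤ j) :
    pvRead X i j = (X.getD i.toNat []).getD j.toNat 0 := by
  have hi' : ((i.toNat : Nat) : Int) = i := by omega
  have hj' : ((j.toNat : Nat) : Int) = j := by omega
  unfold pvRead
  rw [← hi', ← hj', PySem.List.pyGetD_natCast, PySem.List.pyGetD_natCast]
  simp [max_eq_left hi, max_eq_left hj]


theorem write_char (ng : List (List Int)) (a b : Int) (ha : 0 ≤ a) (ha2 : a.toNat < ng.length)
    (hb : 0 ≤ b) (hb2 : b.toNat < (ng.getD a.toNat []).length) :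
    (∀ i j : Int, 0 ≤ i → 0 ≤ j →
      pvRead (PySem.List.pySetD ng a
        (PySem.List.pySetD (PySem.List.pyGetD ng a []) b 1)) i j
        = if i = a ∧ j = b then 1 else pvRead ng i j) ∧
    shapeEq (PySem.List.pySetD ng a
        (PySem.List.pySetD (PySem.List.pyGetD ng a []) b 1)) ng := by
  have ha' : ((a.toNat : Nat) : Int) = a := by omega
  have hb' : ((b.toNat : Nat) : Int) = b := by omega
  have hset : PySem.List.pySetD ng a
      (PySem.List.pySetD (PySem.List.pyGetD ng a []) b 1)
      = ng.set a.toNat ((ng.getD a.toNat []).set b.toNat 1) := by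
    rw [← ha', ← hb', PySem.List.pyGetD_natCast, PySem.List.pySetD_natCast,
      PySem.List.pySetD_natCast]
    simp [max_eq_left ha, max_eq_left hb]
  rw [hset]
  constructor
  · intro i j hi hj
    rw [pvRead_nonneg _ _ _ hi hj, pvRead_nonneg ng i j hi hj]
    simp only [List.getD_eq_getElem?_getD]
    by_cases hia : i = a
    · subst hia
      have h1 : (ng.set i.toNat ((ng.getD i.toNat []).set b.toNat 1)).getD i.toNat []
          = (ng.getD i.toNat []).set b.toNat 1 := by
        rw [List.getD_eq_getElem?_getD, List.getElem?_set]
        simp [ha2]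
      simp only [List.getD_eq_getElem?_getD] at h1
      rw [h1]
      by_cases hjb : j = b
      · subst hjb
        have h2 : ((ng.getD i.toNat []).set j.toNat 1).getD j.toNat 0 = 1 := by
          rw [List.getD_eq_getElem?_getD, List.getElem?_set]
          rw [List.getD_eq_getElem?_getD] at hb2
          simp [hb2]
        simp only [List.getD_eq_getElem?_getD] at h2
        simp [h2]
      · have hjb' : b.toNat ≠ j.toNat := by omega
        have h2 : ((ng.getD i.toNat []).set b.toNat 1).getD j.toNat 0
            = (ng.getD i.toNat []).getD j.toNat 0 := by
          rw [List.getD_eq_getElem?_getD, List.getD_eq_getElem?_getD, List.getElem?_set]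
          simp [hjb']
        simp only [List.getD_eq_getElem?_getD] at h2
        simp [h2, hjb]
    · have hia' : a.toNat ≠ i.toNat := by omega
      have h1 : (ng.set a.toNat ((ng.getD a.toNat []).set b.toNat 1)).getD i.toNat []
          = ng.getD i.toNat [] := by
        rw [List.getD_eq_getElem?_getD, List.getD_eq_getElem?_getD, List.getElem?_set]
        simp [hia']
      simp only [List.getD_eq_getElem?_getD] at h1
      rw [h1]
      simp [hia]
  · refine ⟨by simp, ?_⟩
    intro k
    by_cases hk : a.toNat = k
    · subst hk
      rw [List.getD_eq_getElem?_getD, List.getElem?_set]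
      simp [ha2, List.getD_eq_getElem?_getD]
    · rw [List.getD_eq_getElem?_getD, List.getD_eq_getElem?_getD, List.getElem?_set]
      simp [hk]


theorem getD_mem_of_lt (grid : List (List Int)) (k : Nat) (hk : k < grid.length) :
    grid.getD k [] ∈ grid := by
  rw [List.getD_eq_getElem?_getD, List.getElem?_eq_getElem hk]
  exact List.getElem_mem hk

theorem processBlock_char (grid ng : List (List Int)) (r c : Int) (n : Nat)
    (hr0 : 0 ≤ r) (hc0 : 0 ≤ c) (hr : (r : Int) + 1 < grid.length) (hc : c + 2 ≤ (n : Int))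
    (hrow : ∀ row ∈ grid, n ≤ row.length) (hsh : shapeEq ng grid) :
    (∀ i j : Int, 0 ≤ i → 0 ≤ j →
      pvRead (processBlock grid ng r c) i j
        = if fillsB grid r c i j then 1 else pvRead ng i j) ∧
    shapeEq (processBlock grid ng r c) ng := by
  have hlen : ng.length = grid.length := hsh.1
  have hrowlen : ∀ k : Nat, k < grid.length → n ≤ (ng.getD k []).length := by
    intro k hk
    rw [hsh.2 k]
    exact hrow _ (getD_mem_of_lt grid k hk)
  have hA := pbAux grid ng r c
  -- bounds for the four possible writes
  have hbr : r.toNat < ng.length := by omega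
  have hbr1 : (r + 1).toNat < ng.length := by omega
  have hbc : ∀ a : Int, 0 ≤ a → a.toNat < ng.length → c.toNat < (ng.getD a.toNat []).length := by
    intro a _ ha; have := hrowlen a.toNat (by omega); omega
  have hbc1 : ∀ a : Int, 0 ≤ a → a.toNat < ng.length → (c + 1).toNat < (ng.getD a.toNat []).length := by
    intro a _ ha; have := hrowlen a.toNat (by omega); omega
  by_cases t0 : pvRead grid r c = 0 ∧ ¬pvRead grid r (c + 1) = 0 ∧
      pvRead grid r (c + 1) = pvRead grid (r + 1) c ∧
      pvRead grid (r + 1) c = pvRead grid (r + 1) (c + 1)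
  · obtain ⟨z0, nz1, e12, e23⟩ := t0
    have nz3 : ¬ pvRead grid (r + 1) (c + 1) = 0 := by omega
    have hT : processBlock grid ng r c = pvWrite ng r c := by
      rw [hA]; simp [pbTarget, z0, nz1, e12, e23, nz3]
    obtain ⟨hw, hshw⟩ := write_char ng r c hr0 hbr hc0 (hbc r hr0 hbr)
    refine ⟨?_, by rw [hT]; exact hshw⟩
    intro i j hi hj
    rw [hT]; unfold pvWrite; rw [hw i j hi hj]
    have hiff : fillsB grid r c i j ↔ (i = r ∧ j = c) := by
      rw [fillsB_iff]
      constructor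
      · rintro (⟨h, _⟩ | ⟨_, hz, _⟩ | ⟨_, hz, _⟩ | ⟨_, hz, _⟩)
        · exact h
        all_goals exfalso; omega
      · rintro ⟨rfl, rfl⟩; exact Or.inl ⟨⟨rfl, rfl⟩, z0, nz1, e12, e23⟩
    rw [if_congr hiff rfl rfl]
  by_cases t1 : pvRead grid r (c + 1) = 0 ∧ ¬pvRead grid r c = 0 ∧
      pvRead grid r c = pvRead grid (r + 1) c ∧
      pvRead grid (r + 1) c = pvRead grid (r + 1) (c + 1)
  · obtain ⟨z1, nz0, e02, e23⟩ := t1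
    have nz2 : ¬ pvRead grid (r + 1) c = 0 := by omega
    have nz3 : ¬ pvRead grid (r + 1) (c + 1) = 0 := by omega
    have hT : processBlock grid ng r c = pvWrite ng r (c + 1) := by
      rw [hA]; simp [pbTarget, z1, nz0, nz2, nz3, e02, e23]
    obtain ⟨hw, hshw⟩ := write_char ng r (c + 1) hr0 hbr (by omega) (hbc1 r hr0 hbr)
    refine ⟨?_, by rw [hT]; exact hshw⟩
    intro i j hi hj
    rw [hT]; unfold pvWrite; rw [hw i j hi hj]
    have hiff : fillsB grid r c i j ↔ (i = r ∧ j = c + 1) := by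
      rw [fillsB_iff]
      constructor
      · rintro (⟨_, hz, _⟩ | ⟨h, _⟩ | ⟨_, hz, _⟩ | ⟨_, hz, _⟩)
        · exfalso; omega
        · exact h
        · exfalso; omega
        · exfalso; omega
      · rintro ⟨rfl, rfl⟩; exact Or.inr (Or.inl ⟨⟨rfl, rfl⟩, z1, nz0, e02, e23⟩)
    rw [if_congr hiff rfl rfl]
  by_cases t2 : pvRead grid (r + 1) c = 0 ∧ ¬pvRead grid r c = 0 ∧
      pvRead grid r c = pvRead grid r (c + 1) ∧
      pvRead grid r (c + 1) = pvRead grid (r + 1) (c + 1)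
  · obtain ⟨z2, nz0, e01, e13⟩ := t2
    have nz1 : ¬ pvRead grid r (c + 1) = 0 := by omega
    have nz3 : ¬ pvRead grid (r + 1) (c + 1) = 0 := by omega
    have hT : processBlock grid ng r c = pvWrite ng (r + 1) c := by
      rw [hA]; simp [pbTarget, z2, nz0, nz1, nz3, e01, e13]
    obtain ⟨hw, hshw⟩ := write_char ng (r + 1) c (by omega) hbr1 hc0 (hbc (r + 1) (by omega) hbr1)
    refine ⟨?_, by rw [hT]; exact hshw⟩
    intro i j hi hj
    rw [hT]; unfold pvWrite; rw [hw i j hi hj]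
    have hiff : fillsB grid r c i j ↔ (i = r + 1 ∧ j = c) := by
      rw [fillsB_iff]
      constructor
      · rintro (⟨_, hz, _⟩ | ⟨_, hz, _⟩ | ⟨h, _⟩ | ⟨_, hz, _⟩)
        · exfalso; omega
        · exfalso; omega
        · exact h
        · exfalso; omega
      · rintro ⟨rfl, rfl⟩; exact Or.inr (Or.inr (Or.inl ⟨⟨rfl, rfl⟩, z2, nz0, e01, e13⟩))
    rw [if_congr hiff rfl rfl]
  by_cases t3 : pvRead grid (r + 1) (c + 1) = 0 ∧ ¬pvRead grid r c = 0 ∧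
      pvRead grid r c = pvRead grid r (c + 1) ∧
      pvRead grid r (c + 1) = pvRead grid (r + 1) c
  · obtain ⟨z3, nz0, e01, e12⟩ := t3
    have nz1 : ¬ pvRead grid r (c + 1) = 0 := by omega
    have nz2 : ¬ pvRead grid (r + 1) c = 0 := by omega
    have hT : processBlock grid ng r c = pvWrite ng (r + 1) (c + 1) := by
      rw [hA]; simp [pbTarget, z3, nz0, nz1, nz2, e01, e12]
    obtain ⟨hw, hshw⟩ := write_char ng (r + 1) (c + 1) (by omega) hbr1 (by omega)
      (hbc1 (r + 1) (by omega) hbr1)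
    refine ⟨?_, by rw [hT]; exact hshw⟩
    intro i j hi hj
    rw [hT]; unfold pvWrite; rw [hw i j hi hj]
    have hiff : fillsB grid r c i j ↔ (i = r + 1 ∧ j = c + 1) := by
      rw [fillsB_iff]
      constructor
      · rintro (⟨_, hz, _⟩ | ⟨_, hz, _⟩ | ⟨_, hz, _⟩ | ⟨h, _⟩)
        · exfalso; omega
        · exfalso; omega
        · exfalso; omega
        · exact h
      · rintro ⟨rfl, rfl⟩; exact Or.inr (Or.inr (Or.inr ⟨⟨rfl, rfl⟩, z3, nz0, e01, e12⟩))
    rw [if_congr hiff rfl rfl]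
  have hT : processBlock grid ng r c = ng := by
    rw [hA]; simp [pbTarget, t0, t1, t2, t3]
  refine ⟨?_, by rw [hT]; exact ⟨rfl, fun k => rfl⟩⟩
  intro i j hi hj
  rw [hT]
  have hnf : ¬ fillsB grid r c i j := by
    rw [fillsB_iff]
    rintro (⟨_, hv⟩ | ⟨_, hv⟩ | ⟨_, hv⟩ | ⟨_, hv⟩)
    exacts [t0 hv, t1 hv, t2 hv, t3 hv]
  rw [if_neg hnf]

theorem foldl_char (grid : List (List Int)) (n : Nat)
    (hrow : ∀ row ∈ grid, n ≤ row.length) :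
    ∀ (L : List (Int × Int)),
    (∀ p ∈ L, 0 ≤ p.1 ∧ (p.1 : Int) + 1 < grid.length ∧ 0 ≤ p.2 ∧ p.2 + 2 ≤ (n : Int)) →
    ∀ (ng : List (List Int)), shapeEq ng grid →
    (∀ i j : Int, 0 ≤ i → 0 ≤ j →
      pvRead (L.foldl (fun ng p => processBlock grid ng p.1 p.2) ng) i j
        = if ∃ p ∈ L, fillsB grid p.1 p.2 i j then 1 else pvRead ng i j) ∧
    shapeEq (L.foldl (fun ng p => processBlock grid ng p.1 p.2) ng) grid := by
  intro L
  induction L with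
  | nil =>
    intro _ ng hsh
    exact ⟨fun i j hi hj => by simp, hsh⟩
  | cons p L ih =>
    intro hL ng hsh
    obtain ⟨hp1, hp2, hp3, hp4⟩ := hL p (List.mem_cons_self)
    obtain ⟨hstep, hshs⟩ := processBlock_char grid ng p.1 p.2 n hp1 hp3 hp2 hp4 hrow hsh
    have hsh' : shapeEq (processBlock grid ng p.1 p.2) grid := shapeEq_trans hshs hsh
    obtain ⟨hres, hshf⟩ := ih (fun q hq => hL q (List.mem_cons_of_mem _ hq)) _ hsh'
    refine ⟨?_, by simpa using hshf⟩
    intro i j hi hj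
    rw [List.foldl_cons, hres i j hi hj, hstep i j hi hj]
    by_cases h1 : fillsB grid p.1 p.2 i j <;>
      by_cases h2 : ∃ q ∈ L, fillsB grid q.1 q.2 i j <;>
      simp [h1, h2, List.exists_mem_cons_iff]

theorem foldl_nested (grid init : List (List Int)) (xs ys : List Int) :
    xs.foldl (fun ng r => ys.foldl (fun ng c => processBlock grid ng r c) ng) init
      = (xs.flatMap fun r => ys.map fun c => (r, c)).foldl
          (fun ng p => processBlock grid ng p.1 p.2) init := by
  rw [List.foldl_flatMap]
  congr 1
  funext ng r
  rw [List.foldl_map]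

def blocksL (grid : List (List Int)) : List (Int × Int) :=
  (PySem.List.pyRange 0 ((grid.length : Int) - 1) 1).flatMap fun r =>
    (PySem.List.pyRange 0 (((grid.headD []).length : Int) - 1) 1).map fun c => (r, c)

theorem mem_blocksL (grid : List (List Int)) (p : Int × Int) :
    p ∈ blocksL grid ↔
      0 ≤ p.1 ∧ p.1 < (grid.length : Int) - 1 ∧ 0 ≤ p.2 ∧
        p.2 < ((grid.headD []).length : Int) - 1 := by
  unfold blocksL
  simp only [List.mem_flatMap, List.mem_map, PySem.List.mem_pyRange_one]
  constructor
  · rintro ⟨r, ⟨hr1, hr2⟩, c, ⟨hc1, hc2⟩, rfl⟩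
    exact ⟨hr1, hr2, hc1, hc2⟩
  · rintro ⟨h1, h2, h3, h4⟩
    exact ⟨p.1, ⟨h1, h2⟩, p.2, ⟨h3, h4⟩, rfl⟩

theorem transform_char (grid : List (List Int)) (hpre : Pre_transform grid) :
    (∀ i j : Int, 0 ≤ i → 0 ≤ j →
      pvRead (transform grid) i j
        = if ∃ p ∈ blocksL grid, fillsB grid p.1 p.2 i j then 1 else pvRead grid i j) ∧
    shapeEq (transform grid) grid := by
  by_cases hg : grid = [] ∨ grid.headD [] = []
  · have hbe : blocksL grid = [] := by
      unfold blocksL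
      rcases hg with rfl | hg2
      · simp [PySem.List.pyRange_one_eq_nil (by simp : ((([] : List (List Int)).length : Int) - 1) ≤ 0)]
      · rw [hg2]
        simp [PySem.List.pyRange_one_eq_nil (by simp : ((([] : List Int).length : Int) - 1) ≤ 0)]
    rw [transform, if_pos hg]
    refine ⟨?_, ⟨rfl, fun k => rfl⟩⟩
    intro i j hi hj
    rw [hbe]
    simp
  · rw [transform, if_neg hg]
    simp only [PySem.List.len_eq]
    rw [foldl_nested]
    have hbl : ((PySem.List.pyRange 0 ((grid.length : Int) - 1) 1).flatMap fun r =>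
        (PySem.List.pyRange 0 (((grid.headD []).length : Int) - 1) 1).map fun c => (r, c))
        = blocksL grid := rfl
    rw [hbl]
    rcases hpre with h | h | h
    · have hbe : blocksL grid = [] := by
        unfold blocksL
        rw [show PySem.List.pyRange 0 ((grid.length : Int) - 1) 1 = [] from
          PySem.List.pyRange_one_eq_nil (by omega)]
        simp
      rw [hbe]
      exact ⟨fun i j hi hj => by simp, ⟨rfl, fun k => rfl⟩⟩
    · have hbe : blocksL grid = [] := by
        unfold blocksL
        rw [PySem.List.pyRange_one_eq_nil (show (((grid.headD []).length : Int) - 1) ≤ 0 by omega)]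
        simp
      rw [hbe]
      exact ⟨fun i j hi hj => by simp, ⟨rfl, fun k => rfl⟩⟩
    · refine foldl_char grid (grid.headD []).length h (blocksL grid) ?_ grid ⟨rfl, fun k => rfl⟩
      intro p hp
      rw [mem_blocksL] at hp
      refine ⟨hp.1, by omega, hp.2.2.1, by omega⟩

theorem completes_iff (grid : List (List Int)) (i j : Int) (hi : 0 ≤ i) (hj : 0 ≤ j)
    (hz : pvRead grid i j = 0) :
    completes grid (grid.length : Int) ((grid.headD []).length : Int) i j = true ↔
      ∃ p ∈ blocksL grid, fillsB grid p.1 p.2 i j := by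
  unfold completes
  simp only [List.any_cons, List.any_nil, Bool.or_eq_true, Bool.or_false]
  constructor
  · rintro ((hb | hb) | (hb | hb)) <;>
      rw [Bool.if_false_right] at hb <;>
      simp only [Bool.and_eq_true, decide_eq_true_eq, Bool.not_eq_eq_eq_not, Bool.not_true,
        beq_eq_false_iff_ne, ne_eq, beq_iff_eq] at hb <;>
      obtain ⟨⟨hb1, hb2, hb3, hb4⟩, hcond⟩ := hb
    · exact ⟨(i - 1, j - 1), (mem_blocksL grid _).mpr ⟨hb1, by omega, hb3, by omega⟩,
        (fillsB_true_iff grid _ _ _ _).mpr ⟨by omega, by omega, hz, hcond⟩⟩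
    · exact ⟨(i - 1, j), (mem_blocksL grid _).mpr ⟨hb1, by omega, hb3, by omega⟩,
        (fillsB_true_iff grid _ _ _ _).mpr ⟨by omega, by omega, hz, hcond⟩⟩
    · exact ⟨(i, j - 1), (mem_blocksL grid _).mpr ⟨hb1, by omega, hb3, by omega⟩,
        (fillsB_true_iff grid _ _ _ _).mpr ⟨by omega, by omega, hz, hcond⟩⟩
    · exact ⟨(i, j), (mem_blocksL grid _).mpr ⟨hb1, by omega, hb3, by omega⟩,
        (fillsB_true_iff grid _ _ _ _).mpr ⟨by omega, by omega, hz, hcond⟩⟩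
  · rintro ⟨⟨a, b⟩, hp, hfb⟩
    obtain ⟨hca, hcb, _, hcond⟩ := (fillsB_true_iff grid _ _ _ _).mp hfb
    rw [mem_blocksL] at hp
    obtain ⟨h1, h2, h3, h4⟩ := hp
    simp only at h1 h2 h3 h4 hcond
    rcases hca with rfl | rfl <;> rcases hcb with rfl | rfl
    · refine Or.inr (Or.inr ?_)
      rw [Bool.if_false_right]
      simp only [Bool.and_eq_true, decide_eq_true_eq, Bool.not_eq_eq_eq_not, Bool.not_true,
        beq_eq_false_iff_ne, ne_eq, beq_iff_eq]
      exact ⟨⟨h1, by omega, h3, by omega⟩, hcond⟩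
    · refine Or.inr (Or.inl ?_)
      rw [show (b : Int) + 1 - 1 = b by ring]
      rw [Bool.if_false_right]
      simp only [Bool.and_eq_true, decide_eq_true_eq, Bool.not_eq_eq_eq_not, Bool.not_true,
        beq_eq_false_iff_ne, ne_eq, beq_iff_eq]
      exact ⟨⟨h1, by omega, h3, by omega⟩, hcond⟩
    · refine Or.inl (Or.inr ?_)
      rw [show (a : Int) + 1 - 1 = a by ring]
      rw [Bool.if_false_right]
      simp only [Bool.and_eq_true, decide_eq_true_eq, Bool.not_eq_eq_eq_not, Bool.not_true,
        beq_eq_false_iff_ne, ne_eq, beq_iff_eq]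
      exact ⟨⟨h1, by omega, h3, by omega⟩, hcond⟩
    · refine Or.inl (Or.inl ?_)
      rw [show (a : Int) + 1 - 1 = a by ring, show (b : Int) + 1 - 1 = b by ring]
      rw [Bool.if_false_right]
      simp only [Bool.and_eq_true, decide_eq_true_eq, Bool.not_eq_eq_eq_not, Bool.not_true,
        beq_eq_false_iff_ne, ne_eq, beq_iff_eq]
      exact ⟨⟨h1, by omega, h3, by omega⟩, hcond⟩

theorem pvRead_eq_getElem (X : List (List Int)) (k l : Nat) (hk : k < X.length)
    (hl : l < (X[k]).length) : pvRead X (k : Int) (l : Int) = X[k][l] := by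
  rw [pvRead_nonneg _ _ _ (Int.natCast_nonneg k) (Int.natCast_nonneg l)]
  simp [List.getD_eq_getElem?_getD, hk, hl]

theorem transform_eq_alt (grid : List (List Int)) (hpre : Pre_transform grid) :
    transform grid = transform_alt grid := by
  obtain ⟨hAv, hAsh⟩ := transform_char grid hpre
  have hBlen : (transform_alt grid).length = grid.length := by
    simp [transform_alt, PySem.List.length_enumerate]
  have hBrow : ∀ (k : Nat) (hk : k < grid.length),
      (transform_alt grid)[k]'(by rw [hBlen]; exact hk) =
        (PySem.List.enumerate (grid[k]'hk)).map (fun cv =>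
          if cv.2 ≠ 0 then cv.2
          else if completes grid (PySem.List.len grid)
              (if grid = [] then 0 else PySem.List.len (grid.headD [])) ((k : Int)) cv.1
            then 1 else 0) := by
    intro k hk
    simp [transform_alt, List.getElem_map, PySem.List.getElem_enumerate]
  apply List.ext_getElem (by rw [hAsh.1, hBlen])
  intro k hk1 hk2
  have hkg : k < grid.length := by rw [hAsh.1] at hk1; exact hk1
  have hgne : grid ≠ [] := by intro h; rw [h] at hkg; simp at hkg
  have hArowlen : ((transform grid)[k]).length = (grid[k]).length := by
    have := hAsh.2 k
    rw [List.getD_eq_getElem?_getD, List.getElem?_eq_getElem hk1] at this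
    rw [List.getD_eq_getElem?_getD, List.getElem?_eq_getElem hkg] at this
    exact this
  have hBrowlen : ((transform_alt grid)[k]'hk2).length = (grid[k]).length := by
    rw [hBrow k hkg]
    simp [PySem.List.length_enumerate]
  apply List.ext_getElem (by rw [hArowlen, hBrowlen])
  intro l hl1 hl2
  have hlg : l < (grid[k]).length := by rw [hArowlen] at hl1; exact hl1
  -- the A side, through its pointwise characterization
  have hAval : ((transform grid)[k]'hk1)[l]'hl1
      = if ∃ p ∈ blocksL grid, fillsB grid p.1 p.2 (k : Int) (l : Int) then 1
        else (grid[k]'hkg)[l]'hlg := by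
    rw [← pvRead_eq_getElem _ k l hk1 hl1,
      hAv (k : Int) (l : Int) (Int.natCast_nonneg k) (Int.natCast_nonneg l),
      pvRead_eq_getElem _ k l hkg hlg]
  -- the B side, unfolded at the cell
  have hBq : ((transform_alt grid)[k]'hk2)[l]?
      = some (if (grid[k]'hkg)[l]'hlg ≠ 0 then (grid[k]'hkg)[l]'hlg
        else if completes grid (grid.length : Int) ((grid.headD []).length : Int)
            (k : Int) (l : Int) then 1 else 0) := by
    rw [hBrow k hkg, List.getElem?_map, PySem.List.getElem?_enumerate,
      List.getElem?_eq_getElem hlg]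
    simp [hgne]
  have hBval : ((transform_alt grid)[k]'hk2)[l]'hl2
      = if (grid[k]'hkg)[l]'hlg ≠ 0 then (grid[k]'hkg)[l]'hlg
        else if completes grid (grid.length : Int) ((grid.headD []).length : Int)
            (k : Int) (l : Int) then 1 else 0 := by
    apply Option.some_inj.mp
    rw [← List.getElem?_eq_getElem hl2, hBq]
  rw [hAval, hBval]
  by_cases hv : (grid[k]'hkg)[l]'hlg = 0
  · have hz : pvRead grid (k : Int) (l : Int) = 0 := by
      rw [pvRead_eq_getElem _ k l hkg hlg]; exact hv
    rw [if_neg (c := (grid[k]'hkg)[l]'hlg ≠ 0) (by simpa using hv)]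
    by_cases he : ∃ p ∈ blocksL grid, fillsB grid p.1 p.2 (k : Int) (l : Int)
    · rw [if_pos he, if_pos ((completes_iff grid _ _ (Int.natCast_nonneg k)
        (Int.natCast_nonneg l) hz).mpr he)]
    · rw [if_neg he, if_neg (fun hc => he ((completes_iff grid _ _ (Int.natCast_nonneg k)
        (Int.natCast_nonneg l) hz).mp hc)), hv]
  · have hne : ¬ ∃ p ∈ blocksL grid, fillsB grid p.1 p.2 (k : Int) (l : Int) := by
      rintro ⟨p, _, hf⟩
      have hz := ((fillsB_true_iff grid _ _ _ _).mp hf).2.2.1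
      rw [pvRead_eq_getElem _ k l hkg hlg] at hz
      exact hv hz
    rw [if_neg hne, if_pos (c := (grid[k]'hkg)[l]'hlg ≠ 0) (by simpa using hv)]

-- ===== VERDICT (by name: the statement is the Claim_ definition above) =====
theorem transform_spec : Claim_equal_transform := by
  intro grid _hdom hpre
  unfold Spec_transform
  exact transform_eq_alt grid hpre
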